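-- pv_equiv track=rewrite | github.com/iund/crossark-scraper | scrape.py | group_max_for
-- ===== SOURCE A (Python) =====
-- def group_max_for(entries, group_name, max_name):
--     groups = {}
--     group_max = {}
--     out = {}
--
--     for entry in entries:
--         groups[(entry[group_name], entry[max_name])] = entry
--
--         group_max[entry[group_name]] = (
--             max(entry[max_name], group_max[entry[group_name]])
--             if entry[group_name] in group_max
--             else entry[max_name]
--         )
--
--     for map_name, max_val in group_max.items():
--         out[map_name] = groups[(map_name, max_val)]
--
--     return out
-- ===== SOURCE B (Python) =====
-- def group_max_for(entries, group_name, max_name):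
--     best = {}
--     for entry in entries:
--         g = entry[group_name]
--         if g not in best or best[g][max_name] <= entry[max_name]:
--             best[g] = entry
--     return best
-- ===== Notes on version B (the rewrite author's own statement) =====
-- stated objective: simpler
-- what changed: Replaces A's two-dict two-pass scheme (a composite-key index plus a per-group running max, then a rebuild pass) with a single pass keeping one dict from group key to the current winning entry, using <= so the last entry with the maximal value wins exactly as in A.
import Mathlib
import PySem

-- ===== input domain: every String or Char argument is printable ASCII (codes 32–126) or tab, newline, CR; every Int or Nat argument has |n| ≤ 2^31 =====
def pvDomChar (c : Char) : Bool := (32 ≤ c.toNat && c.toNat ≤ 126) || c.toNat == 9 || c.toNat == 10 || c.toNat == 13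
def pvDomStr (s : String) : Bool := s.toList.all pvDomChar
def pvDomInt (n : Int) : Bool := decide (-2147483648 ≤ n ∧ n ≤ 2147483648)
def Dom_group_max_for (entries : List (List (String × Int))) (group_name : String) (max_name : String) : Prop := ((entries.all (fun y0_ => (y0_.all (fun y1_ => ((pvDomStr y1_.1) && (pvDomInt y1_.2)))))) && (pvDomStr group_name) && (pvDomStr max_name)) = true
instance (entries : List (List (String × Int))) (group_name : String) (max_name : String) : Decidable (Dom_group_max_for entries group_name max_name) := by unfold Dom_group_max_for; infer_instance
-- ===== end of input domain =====

-- B replaces A's two-pass scheme (composite-key index dict + per-group running max, then a rebuild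
-- pass) with a single pass keeping one dict from group key to the current winning entry (objective:
-- simpler).

-- entry[k] for an entry dict; total form with default 0, used under Pre_ (key present)
def pvLook (entry : List (String × Int)) (k : String) : Int :=
  (PySem.Dict.mk entry).getD k 0

-- ===== PORT A =====
-- one iteration of A's first loop over (groups, group_max)
def pvAStep (group_name max_name : String)
    (st : PySem.Dict (Int × Int) (List (String × Int)) × PySem.Dict Int Int)
    (entry : List (String × Int)) :
    PySem.Dict (Int × Int) (List (String × Int)) × PySem.Dict Int Int :=
  (st.1.insert (pvLook entry group_name, pvLook entry max_name) entry,
   st.2.insert (pvLook entry group_name)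
     (if st.2.contains (pvLook entry group_name) then
        max (pvLook entry max_name) (st.2.getD (pvLook entry group_name) 0)
      else pvLook entry max_name))

-- one iteration of A's second loop building out
def pvOutStep (G : PySem.Dict (Int × Int) (List (String × Int)))
    (out : PySem.Dict Int (List (String × Int))) (p : Int × Int) :
    PySem.Dict Int (List (String × Int)) :=
  out.insert p.1 (G.getD (p.1, p.2) [])

def group_max_for (entries : List (List (String × Int))) (group_name : String) (max_name : String) : List (Int × List (String × Int)) :=
  let st := entries.foldl (pvAStep group_name max_name) (PySem.Dict.empty, PySem.Dict.empty)
  (st.2.items.foldl (pvOutStep st.1) PySem.Dict.empty).items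

-- ===== PORT B =====
-- one iteration of B's single loop over best
def pvBStep (group_name max_name : String)
    (best : PySem.Dict Int (List (String × Int))) (entry : List (String × Int)) :
    PySem.Dict Int (List (String × Int)) :=
  if !best.contains (pvLook entry group_name)
      || decide (pvLook (best.getD (pvLook entry group_name) []) max_name ≤ pvLook entry max_name)
  then best.insert (pvLook entry group_name) entry
  else best

def group_max_for_alt (entries : List (List (String × Int))) (group_name : String) (max_name : String) : List (Int × List (String × Int)) :=
  (entries.foldl (pvBStep group_name max_name) PySem.Dict.empty).items

-- ===== PRECONDITION & SPEC =====
-- Pre_ excludes exactly the inputs where Python A raises KeyError: an entry missing the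
-- group_name or max_name key.
def Pre_group_max_for (entries : List (List (String × Int))) (group_name : String) (max_name : String) : Prop :=
  entries.all (fun e => (PySem.Dict.mk e).contains group_name && (PySem.Dict.mk e).contains max_name) = true
instance (entries : List (List (String × Int))) (group_name : String) (max_name : String) : Decidable (Pre_group_max_for entries group_name max_name) := by unfold Pre_group_max_for; infer_instance

def pvWitness_group_max_for : (List (List (String × Int))) × String × String :=
  ([[("g", 1), ("m", 5)], [("g", 1), ("m", 7)], [("g", 2), ("m", 3)]], "g", "m")

def Spec_group_max_for (entries : List (List (String × Int))) (group_name : String) (max_name : String) (out : List (Int × List (String × Int))) : Prop := out = group_max_for_alt entries group_name max_name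
instance (entries : List (List (String × Int))) (group_name : String) (max_name : String) (out : List (Int × List (String × Int))) : Decidable (Spec_group_max_for entries group_name max_name out) := by unfold Spec_group_max_for; infer_instance

-- ===== CLAIM (what is proved, stated in full; the proofs are below) =====
def Claim_equal_group_max_for : Prop := ∀ (entries : List (List (String × Int))) (group_name : String) (max_name : String), Dom_group_max_for entries group_name max_name → Pre_group_max_for entries group_name max_name → Spec_group_max_for entries group_name max_name (group_max_for entries group_name max_name)

-- ===== LEMMAS AND PROOFS =====

-- the loop invariant tying A's state (groups G, group_max M) to B's state best
def pvInv (max_name : String)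
    (G : PySem.Dict (Int × Int) (List (String × Int)))
    (M : PySem.Dict Int Int)
    (best : PySem.Dict Int (List (String × Int))) : Prop :=
  best.keys.Nodup ∧
  M.items = best.items.map (fun p => (p.1, pvLook p.2 max_name)) ∧
  ∀ p ∈ best.items, G.get? (p.1, pvLook p.2 max_name) = some p.2

theorem pvInv_step (group_name max_name : String)
    (G : PySem.Dict (Int × Int) (List (String × Int))) (M : PySem.Dict Int Int)
    (best : PySem.Dict Int (List (String × Int))) (e : List (String × Int))
    (h : pvInv max_name G M best) :
    pvInv max_name (pvAStep group_name max_name (G, M) e).1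
      (pvAStep group_name max_name (G, M) e).2
      (pvBStep group_name max_name best e) := by
  obtain ⟨hnd, hM, hG⟩ := h
  have hkeys : M.keys = best.keys := by
    simp only [PySem.Dict.keys, hM, List.map_map]; rfl
  have hndM : M.keys.Nodup := by rw [hkeys]; exact hnd
  have hcont : M.contains (pvLook e group_name) = best.contains (pvLook e group_name) := by
    rw [PySem.Dict.contains_eq_decide_mem_keys, PySem.Dict.contains_eq_decide_mem_keys, hkeys]
  by_cases hc : best.contains (pvLook e group_name) = true
  · -- the group key is already present: best.get? g = some e0
    have hsome : (best.get? (pvLook e group_name)).isSome = true := by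
      rw [← PySem.Dict.contains_eq_isSome_get?]; exact hc
    obtain ⟨e0, hge0⟩ := Option.isSome_iff_exists.mp hsome
    have he0mem : (pvLook e group_name, e0) ∈ best.items :=
      (PySem.Dict.get?_eq_some_iff_mem_items best _ e0 hnd).1 hge0
    have hMg : M.get? (pvLook e group_name) = some (pvLook e0 max_name) := by
      refine PySem.Dict.get?_of_mem_items M ?_ hndM
      rw [hM]
      exact List.mem_map_of_mem he0mem
    have hgetD : best.getD (pvLook e group_name) [] = e0 :=
      PySem.Dict.getD_of_get?_eq_some best [] hge0
    have hMgetD : M.getD (pvLook e group_name) 0 = pvLook e0 max_name :=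
      PySem.Dict.getD_of_get?_eq_some M 0 hMg
    have huniq : ∀ p ∈ best.items, p.1 = pvLook e group_name → p = (pvLook e group_name, e0) := by
      intro p hp hpg
      have hp' : (p.1, p.2) ∈ best.items := by simpa using hp
      have := PySem.Dict.get?_of_mem_items best hp' hnd
      rw [hpg, hge0] at this
      have : p.2 = e0 := by injection this.symm
      rw [← hpg, ← this]
    by_cases hle : pvLook e0 max_name ≤ pvLook e max_name
    · -- new value wins (ties included): both sides overwrite the group entry
      have hmax : max (pvLook e max_name) (pvLook e0 max_name) = pvLook e max_name :=
        max_eq_left hle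
      unfold pvAStep pvBStep pvInv
      simp only [hcont, hc, hgetD, hle, decide_true, Bool.or_true, hMgetD, hmax,
        if_true]
      refine ⟨PySem.Dict.nodup_keys_insert _ _ _ hnd, ?_, ?_⟩
      · rw [PySem.Dict.items_insert_of_contains M _ (by rw [hcont]; exact hc),
            PySem.Dict.items_insert_of_contains best _ hc, hM, List.map_map, List.map_map]
        refine List.map_congr_left ?_
        intro p hp
        by_cases hpg : p.1 = pvLook e group_name
        · simp [hpg]
        · simp [hpg]
      · intro p hp
        rw [PySem.Dict.mem_items_insert] at hp
        rcases hp with hp | ⟨hp, hpne⟩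
        · subst hp
          exact PySem.Dict.get?_insert_self _ _ _
        · rw [PySem.Dict.get?_insert_of_ne]
          · exact hG p hp
          · intro hk
            exact hpne (congrArg Prod.fst hk)
    · -- old value strictly larger: A keeps the old max (insert is a no-op), B keeps best
      have hmax : max (pvLook e max_name) (pvLook e0 max_name) = pvLook e0 max_name :=
        max_eq_right (le_of_lt (lt_of_not_ge hle))
      have hMid : (M.insert (pvLook e group_name) (pvLook e0 max_name)).items = M.items := by
        rw [PySem.Dict.items_insert_of_contains M _ (by rw [hcont]; exact hc)]
        have : ∀ p ∈ M.items,
            (if (p.1 == pvLook e group_name) = true then (pvLook e group_name, pvLook e0 max_name) else p) = p := by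
          intro p hp
          by_cases hpg : p.1 = pvLook e group_name
          · have hp' : (p.1, p.2) ∈ M.items := by simpa using hp
            have := PySem.Dict.get?_of_mem_items M hp' hndM
            rw [hpg, hMg] at this
            have h2 : p.2 = pvLook e0 max_name := by injection this.symm
            simp only [hpg, beq_self_eq_true, if_true, ← h2]
            rw [← hpg]
          · simp [hpg]
        rw [List.map_congr_left this]
        simp
      unfold pvAStep pvBStep pvInv
      simp only [hcont, hc, hgetD, hle, decide_false, Bool.or_false, hMgetD,
        hmax, if_true, Bool.not_true, Bool.false_eq_true, if_false]
      refine ⟨hnd, by rw [hMid, hM], ?_⟩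
      intro p hp
      rw [PySem.Dict.get?_insert_of_ne]
      · exact hG p hp
      · intro hk
        have hpg : p.1 = pvLook e group_name := congrArg Prod.fst hk
        have hpe0 : p = (pvLook e group_name, e0) := huniq p hp hpg
        have : pvLook p.2 max_name = pvLook e max_name := congrArg Prod.snd hk
        rw [hpe0] at this
        exact hle (le_of_eq this)
  · -- fresh group key: both sides append
    have hc' : best.contains (pvLook e group_name) = false := by
      simpa using hc
    have hcM : M.contains (pvLook e group_name) = false := by rw [hcont]; exact hc'
    unfold pvAStep pvBStep pvInv
    simp only [hc', hcM, Bool.not_false, Bool.true_or, if_true]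
    refine ⟨PySem.Dict.nodup_keys_insert _ _ _ hnd, ?_, ?_⟩
    · rw [PySem.Dict.items_insert_of_not_contains M _ hcM,
          PySem.Dict.items_insert_of_not_contains best _ hc', hM, List.map_append]
      rfl
    · intro p hp
      rw [PySem.Dict.mem_items_insert] at hp
      rcases hp with hp | ⟨hp, hpne⟩
      · subst hp
        exact PySem.Dict.get?_insert_self _ _ _
      · rw [PySem.Dict.get?_insert_of_ne]
        · exact hG p hp
        · intro hk
          exact hpne (congrArg Prod.fst hk)

theorem pvInv_fold (group_name max_name : String)
    (l : List (List (String × Int)))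
    (G : PySem.Dict (Int × Int) (List (String × Int))) (M : PySem.Dict Int Int)
    (best : PySem.Dict Int (List (String × Int)))
    (h : pvInv max_name G M best) :
    pvInv max_name (l.foldl (pvAStep group_name max_name) (G, M)).1
      (l.foldl (pvAStep group_name max_name) (G, M)).2
      (l.foldl (pvBStep group_name max_name) best) := by
  induction l generalizing G M best with
  | nil => exact h
  | cons e l ih =>
      have := ih (pvAStep group_name max_name (G, M) e).1
        (pvAStep group_name max_name (G, M) e).2
        (pvBStep group_name max_name best e)
        (pvInv_step group_name max_name G M best e h)
      simpa using this

theorem pvInv_out (max_name : String)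
    (G : PySem.Dict (Int × Int) (List (String × Int))) (M : PySem.Dict Int Int)
    (best : PySem.Dict Int (List (String × Int)))
    (h : pvInv max_name G M best) :
    (M.items.foldl (pvOutStep G) PySem.Dict.empty).items = best.items := by
  obtain ⟨hnd, hM, hG⟩ := h
  rw [hM, List.foldl_map]
  have hfresh : ∀ p ∈ best.items,
      (PySem.Dict.empty : PySem.Dict Int (List (String × Int))).contains p.1 = false := by
    intro p _; exact PySem.Dict.contains_empty _
  have hnd' : (best.items.map (fun p : Int × List (String × Int) => p.1)).Nodup := hnd
  have hfold := PySem.Dict.items_foldl_insert_fresh best.items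
    (fun p : Int × List (String × Int) => p.1)
    (fun p : Int × List (String × Int) => G.getD (p.1, pvLook p.2 max_name) [])
    PySem.Dict.empty hfresh hnd'
  unfold pvOutStep
  rw [hfold]
  have : ∀ p ∈ best.items,
      ((fun p : Int × List (String × Int) => (p.1, G.getD (p.1, pvLook p.2 max_name) [])) p) = p := by
    intro p hp
    have := PySem.Dict.getD_of_get?_eq_some G [] (hG p hp)
    simp [this]
  rw [List.map_congr_left this]
  simp [PySem.Dict.empty]

-- ===== VERDICT (by name: the statement is the Claim_ definition above) =====
theorem group_max_for_spec : Claim_equal_group_max_for := by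
  intro entries group_name max_name _ _
  unfold Spec_group_max_for group_max_for group_max_for_alt
  have h0 : pvInv max_name PySem.Dict.empty PySem.Dict.empty PySem.Dict.empty :=
    ⟨by simp [PySem.Dict.keys_empty], by simp [PySem.Dict.empty], by simp [PySem.Dict.empty]⟩
  exact pvInv_out max_name _ _ _ (pvInv_fold group_name max_name entries _ _ _ h0)
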